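-- pv_equiv track=rewrite | github.com/mikeee-anderson/COMPSCI-101 | COMPSCI-101/CS101/Optional Lab 15/Question 3.py | create_vowels_dictionary
-- ===== SOURCE A (Python) =====
-- def create_vowels_dictionary(words_list):
--     vowels = "aeiou"
--     vowels_dict = {"a":[], "e":[], "i":[], "o":[], "u":[]}
--     words_list.sort()
--     for word in words_list:
--         if word[0] == "a":
--             if word not in vowels_dict["a"]:
--                 vowels_dict["a"].append(word)
--         elif word[0] == "e":
--             if word not in vowels_dict["e"]:
--                 vowels_dict["e"].append(word)
--         elif word[0] == "i":
--             if word not in vowels_dict["i"]: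
--                 vowels_dict["i"].append(word)
--         elif word[0] == "o":
--             if word not in vowels_dict["o"]:
--                 vowels_dict["o"].append(word)
--         elif word[0] == "u":
--             if word not in vowels_dict["u"]:
--                 vowels_dict["u"].append(word)
--     return vowels_dict
-- ===== SOURCE B (Python) =====
-- def create_vowels_dictionary(words_list):
--     # Sorts words_list in place (same observable mutation as A).
--     # After sorting, equal words are adjacent, so deduplication is a single
--     # O(1) comparison with the previous word instead of A's O(bucket) scan.
--     words_list.sort()
--     vowels_dict = {"a": [], "e": [], "i": [], "o": [], "u": []}
--     prev = None
--     for word in words_list: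
--         if word == prev:
--             continue
--         prev = word
--         if word[0] in vowels_dict:
--             vowels_dict[word[0]].append(word)
--     return vowels_dict
-- ===== Notes on version B (the rewrite author's own statement) =====
-- stated objective: faster
-- what changed: A dedups each word by scanning its whole vowel bucket with 'not in'; B exploits that the list is already sorted, so duplicates are adjacent and a single comparison with the previous word replaces the linear bucket scan, and one 'key in dict' test replaces the five-way elif chain.
import Mathlib
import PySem

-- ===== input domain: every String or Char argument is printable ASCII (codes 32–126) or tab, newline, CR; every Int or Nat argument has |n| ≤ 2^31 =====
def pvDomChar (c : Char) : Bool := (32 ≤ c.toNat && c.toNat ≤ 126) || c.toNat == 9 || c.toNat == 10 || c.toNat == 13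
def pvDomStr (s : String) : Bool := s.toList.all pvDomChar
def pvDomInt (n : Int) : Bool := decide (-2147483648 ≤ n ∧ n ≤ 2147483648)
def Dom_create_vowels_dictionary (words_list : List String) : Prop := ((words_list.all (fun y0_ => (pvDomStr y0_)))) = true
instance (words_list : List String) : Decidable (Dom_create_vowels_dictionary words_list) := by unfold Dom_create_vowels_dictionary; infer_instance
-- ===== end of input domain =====

-- B replaces A's per-word 'not in bucket' scan by a single comparison with the previous
-- word of the sorted list (duplicates are adjacent after sorting); objective: faster.
-- Both A and B sort words_list in place in Python; the equivalence proved here is about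
-- the RETURN value (both perform the same in-place sort).

-- ===== PORT A =====
def pvVowelsInit : PySem.Dict String (List String) :=
  PySem.Dict.ofList [("a", []), ("e", []), ("i", []), ("o", []), ("u", [])]

def pvStepA (d : PySem.Dict String (List String)) (word : String) :
    PySem.Dict String (List String) :=
  match PySem.Str.pyGet? word 0 with
  | none => d
  | some c =>
    if c = 'a' then (if word ∈ d.getD "a" [] then d else d.modify "a" [] (· ++ [word]))
    else if c = 'e' then (if word ∈ d.getD "e" [] then d else d.modify "e" [] (· ++ [word]))
    else if c = 'i' then (if word ∈ d.getD "i" [] then d else d.modify "i" [] (· ++ [word]))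
    else if c = 'o' then (if word ∈ d.getD "o" [] then d else d.modify "o" [] (· ++ [word]))
    else if c = 'u' then (if word ∈ d.getD "u" [] then d else d.modify "u" [] (· ++ [word]))
    else d

def create_vowels_dictionary (words_list : List String) : List (String × List String) :=
  ((PySem.List.sorted words_list (fun x => x) false).foldl pvStepA pvVowelsInit).items

-- ===== PORT B =====
-- B builds the same literal starting dict {"a": [], …} itself
def pvVowelsInitB : PySem.Dict String (List String) :=
  PySem.Dict.ofList [("a", []), ("e", []), ("i", []), ("o", []), ("u", [])]

def pvStepB (s : PySem.Dict String (List String) × Option String) (word : String) :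
    PySem.Dict String (List String) × Option String :=
  if some word = s.2 then s
  else
    match PySem.Str.pyGet? word 0 with
    | none => (s.1, some word)
    | some c =>
      if s.1.contains (String.ofList [c]) then (s.1.modify (String.ofList [c]) [] (· ++ [word]), some word)
      else (s.1, some word)

def create_vowels_dictionary_alt (words_list : List String) : List (String × List String) :=
  ((PySem.List.sorted words_list (fun x => x) false).foldl pvStepB (pvVowelsInitB, none)).1.items

-- ===== PRECONDITION & SPEC =====
-- Pre_ excludes lists containing the empty string, on which Python's word[0] raises IndexError.
def Pre_create_vowels_dictionary (words_list : List String) : Prop :=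
  ∀ w ∈ words_list, w ≠ ""
instance (words_list : List String) : Decidable (Pre_create_vowels_dictionary words_list) := by
  unfold Pre_create_vowels_dictionary; infer_instance
def pvWitness_create_vowels_dictionary : List String :=
  ["egg", "apple", "egg", "xray", "ice", "apple"]

def Spec_create_vowels_dictionary (words_list : List String) (out : List (String × List String)) : Prop := out = create_vowels_dictionary_alt words_list
instance (words_list : List String) (out : List (String × List String)) : Decidable (Spec_create_vowels_dictionary words_list out) := by unfold Spec_create_vowels_dictionary; infer_instance

-- ===== CLAIM (what is proved, stated in full; the proofs are below) =====
def Claim_equal_create_vowels_dictionary : Prop := ∀ (words_list : List String), Dom_create_vowels_dictionary words_list → Pre_create_vowels_dictionary words_list → Spec_create_vowels_dictionary words_list (create_vowels_dictionary words_list)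

-- ===== LEMMAS AND PROOFS =====
lemma pv_init_eq :
    pvVowelsInit = PySem.Dict.mk [("a", []), ("e", []), ("i", []), ("o", []), ("u", [])] := by
  decide

lemma pv_initB_eq : pvVowelsInitB = pvVowelsInit := by decide

lemma pv_init_contains (s : String) :
    pvVowelsInit.contains s = true ↔ s = "a" ∨ s = "e" ∨ s = "i" ∨ s = "o" ∨ s = "u" := by
  rw [pv_init_eq]
  simp [PySem.Dict.contains_mk]
  tauto

lemma pv_init_getD (k : String) : pvVowelsInit.getD k [] = [] := by
  rw [pv_init_eq, PySem.Dict.getD_eq_get?_getD]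
  simp only [PySem.Dict.get?_mk_cons]
  split_ifs <;> rfl

lemma pv_lit_a : String.ofList ['a'] = "a" := by decide
lemma pv_lit_e : String.ofList ['e'] = "e" := by decide
lemma pv_lit_i : String.ofList ['i'] = "i" := by decide
lemma pv_lit_o : String.ofList ['o'] = "o" := by decide
lemma pv_lit_u : String.ofList ['u'] = "u" := by decide

lemma pv_key_eq (c v : Char) : String.ofList [c] = String.ofList [v] ↔ c = v := by
  constructor
  · intro h
    have := congrArg String.toList h
    simpa using this
  · intro h; rw [h]

lemma pv_main (ws : List String) (hs : ws.Pairwise (· ≤ ·))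
    (d : PySem.Dict String (List String)) (prev : Option String)
    (hK : ∀ s, d.contains s = true ↔ s = "a" ∨ s = "e" ∨ s = "i" ∨ s = "o" ∨ s = "u")
    (hM : ∀ k x, x ∈ d.getD k [] → ∃ p, prev = some p ∧ x ≤ p)
    (hP : ∀ p, prev = some p → ∀ c, PySem.Str.pyGet? p 0 = some c →
          d.contains (String.ofList [c]) = true → p ∈ d.getD (String.ofList [c]) [])
    (hH : ∀ p, prev = some p → ∀ y ∈ ws, p ≤ y) :
    ws.foldl pvStepA d = (ws.foldl pvStepB (d, prev)).1 := by
  induction ws generalizing d prev with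
  | nil => rfl
  | cons w t ih =>
    rw [List.pairwise_cons] at hs
    obtain ⟨h1, hs'⟩ := hs
    simp only [List.foldl_cons]
    by_cases hpe : some w = prev
    · -- duplicate of prev: both steps are no-ops on the dict
      have hA : pvStepA d w = d := by
        unfold pvStepA
        cases hc : PySem.Str.pyGet? w 0 with
        | none => rfl
        | some c =>
          have hmem : ∀ v : Char, c = v →
              d.contains (String.ofList [v]) = true → w ∈ d.getD (String.ofList [v]) [] := by
            intro v hv hcont
            subst hv
            exact hP w hpe.symm c hc hcont
          by_cases ha : c = 'a'
          · have : w ∈ d.getD "a" [] := hmem 'a' ha ((hK _).2 (by tauto))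
            simp [ha, this]
          · by_cases he : c = 'e'
            · have : w ∈ d.getD "e" [] := hmem 'e' he ((hK _).2 (by tauto))
              simp [ha, he, this]
            · by_cases hi : c = 'i'
              · have : w ∈ d.getD "i" [] := hmem 'i' hi ((hK _).2 (by tauto))
                simp [ha, he, hi, this]
              · by_cases ho : c = 'o'
                · have : w ∈ d.getD "o" [] := hmem 'o' ho ((hK _).2 (by tauto))
                  simp [ha, he, hi, ho, this]
                · by_cases hu : c = 'u'
                  · have : w ∈ d.getD "u" [] := hmem 'u' hu ((hK _).2 (by tauto))
                    simp [ha, he, hi, ho, hu, this]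
                  · simp [ha, he, hi, ho, hu]
      have hB : pvStepB (d, prev) w = (d, prev) := by
        unfold pvStepB; simp [hpe]
      rw [hA, hB]
      exact ih hs' d prev hK hM hP (fun p hp y hy => hH p hp y (List.mem_cons_of_mem _ hy))
    · -- new word: not in any bucket
      have hprevle : ∀ p, prev = some p → p ≤ w := fun p hp => hH p hp w (List.mem_cons_self)
      have hnm : ∀ k, w ∉ d.getD k [] := by
        intro k hmem
        obtain ⟨p, hp, hle⟩ := hM k w hmem
        exact hpe (by rw [hp, le_antisymm hle (hprevle p hp)])
      have hM' : ∀ p', (some w : Option String) = some p' →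
          ∀ k x, x ∈ d.getD k [] → x ≤ p' := by
        intro p' hp' k x hx
        obtain ⟨p, hp, hle⟩ := hM k x hx
        cases hp'
        exact le_trans hle (hprevle p hp)
      have hH' : ∀ p, (some w : Option String) = some p → ∀ y ∈ t, p ≤ y := by
        intro p hp y hy; cases hp; exact h1 y hy
      have hBne : ¬ (some w = prev) := hpe
      cases hc : PySem.Str.pyGet? w 0 with
      | none =>
        have hA : pvStepA d w = d := by unfold pvStepA; rw [hc]
        have hB : pvStepB (d, prev) w = (d, some w) := by
          unfold pvStepB; rw [if_neg hBne]; simp only [hc]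
        rw [hA, hB]
        refine ih hs' d (some w) hK
          (fun k x hx => ⟨w, rfl, hM' w rfl k x hx⟩)
          (fun p hp c hcc _ => by cases hp; rw [hc] at hcc; cases hcc)
          hH'
      | some c =>
        -- the dict both sides compute
        by_cases hv : c = 'a' ∨ c = 'e' ∨ c = 'i' ∨ c = 'o' ∨ c = 'u'
        · have hcont : d.contains (String.ofList [c]) = true := by
            apply (hK _).2
            rcases hv with h | h | h | h | h <;> subst h <;>
              simp [pv_lit_a, pv_lit_e, pv_lit_i, pv_lit_o, pv_lit_u]
          have hA : pvStepA d w = d.modify (String.ofList [c]) [] (· ++ [w]) := by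
            unfold pvStepA; rw [hc]
            rcases hv with h | h | h | h | h <;> subst h <;>
              simp [hnm, pv_lit_a, pv_lit_e, pv_lit_i, pv_lit_o, pv_lit_u]
          have hB : pvStepB (d, prev) w =
              (d.modify (String.ofList [c]) [] (· ++ [w]), some w) := by
            unfold pvStepB; rw [if_neg hBne]; simp only [hc, hcont, if_pos]
          rw [hA, hB]
          set d' := d.modify (String.ofList [c]) [] (· ++ [w]) with hd'
          have hK' : ∀ s, d'.contains s = true ↔
              s = "a" ∨ s = "e" ∨ s = "i" ∨ s = "o" ∨ s = "u" := by
            intro s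
            rw [hd', PySem.Dict.contains_modify]
            constructor
            · intro h
              rcases Bool.or_eq_true_iff.1 h with h | h
              · have : s = String.ofList [c] := by simpa using h
                subst this
                exact (hK _).1 hcont
              · exact (hK _).1 h
            · intro h
              apply Bool.or_eq_true_iff.2
              right
              exact (hK _).2 h
          have hgetD' : ∀ k, d'.getD k [] =
              if k = String.ofList [c] then d.getD (String.ofList [c]) [] ++ [w]
              else d.getD k [] := by
            intro k
            rw [hd', PySem.Dict.getD_modify]
          refine ih hs' d' (some w) hK' ?_ ?_ hH'
          · intro k x hx
            refine ⟨w, rfl, ?_⟩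
            rw [hgetD' k] at hx
            split_ifs at hx with hk
            · rcases List.mem_append.1 hx with hx | hx
              · exact hM' w rfl _ x hx
              · simp at hx; simp [hx]
            · exact hM' w rfl k x hx
          · intro p hp c' hcc' hcont'
            cases hp
            rw [hc] at hcc'
            cases hcc'
            rw [hgetD' _]
            simp
        · -- non-vowel first letter: both leave the dict unchanged
          push_neg at hv
          obtain ⟨ha, he, hi', ho, hu⟩ := hv
          have hncont : d.contains (String.ofList [c]) = false := by
            rcases Bool.eq_false_or_eq_true (d.contains (String.ofList [c])) with h | h
            swap
            · exact h
            · exfalso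
              rcases (hK _).1 h with hh | hh | hh | hh | hh <;>
                [exact ha ((pv_key_eq c 'a').1 hh); exact he ((pv_key_eq c 'e').1 hh);
                 exact hi' ((pv_key_eq c 'i').1 hh); exact ho ((pv_key_eq c 'o').1 hh);
                 exact hu ((pv_key_eq c 'u').1 hh)]
          have hA : pvStepA d w = d := by
            unfold pvStepA; rw [hc]; simp [ha, he, hi', ho, hu]
          have hB : pvStepB (d, prev) w = (d, some w) := by
            unfold pvStepB; rw [if_neg hBne]; simp only [hc, hncont]; simp
          rw [hA, hB]
          refine ih hs' d (some w) hK
            (fun k x hx => ⟨w, rfl, hM' w rfl k x hx⟩)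
            (fun p hp c' hcc' hcont' => by
              cases hp; rw [hc] at hcc'; cases hcc'
              rw [hncont] at hcont'; cases hcont')
            hH'

-- ===== VERDICT (by name: the statement is the Claim_ definition above) =====
theorem create_vowels_dictionary_spec : Claim_equal_create_vowels_dictionary := by
  intro words_list _ _
  unfold Spec_create_vowels_dictionary create_vowels_dictionary create_vowels_dictionary_alt
  rw [pv_initB_eq]
  congr 1
  exact pv_main _ (by simpa using PySem.List.sorted_pairwise words_list (fun x => x))
    pvVowelsInit none pv_init_contains
    (fun k x hx => by rw [pv_init_getD] at hx; cases hx)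
    (fun p hp => by cases hp)
    (fun p hp => by cases hp)
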